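-- pv_equiv track=rewrite | github.com/tlijkkkk/mark_v | leetcode-practice/leetcode_practice/two_pointers/sliding_windows/leetcode2516_take_k_each_char_left_right.py | take_k_each_char_left_right
-- ===== SOURCE A (Python) =====
-- from collections import Counter, defaultdict
-- from typing import Dict
--
-- def take_k_each_char_left_right(s: str, k: int) -> int:
--     counter: Dict[str, int] = dict(Counter(s))
--     dt_counter: Dict[str, int] = defaultdict(int)
--     max_len = 0
--     i = 0
--
--     if k == 0:
--         return 0
--
--     if len(counter) < 3 or any( x < k for x in counter.values()):
--         return -1
--
--     for j in range(len(s)):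
--         dt_counter[s[j]] += 1
--
--         while dt_counter[s[j]] > counter[s[j]] - k:
--             dt_counter[s[i]] -= 1
--             i += 1
--
--         max_len = max(max_len, j - i + 1)
--
--     return len(s) - max_len
-- ===== SOURCE B (Python) =====
-- def take_k_each_char_left_right(s, k):
--     if k == 0:
--         return 0
--     cnt = {}
--     for c in s:
--         cnt[c] = cnt.get(c, 0) + 1
--     if len(cnt) < 3 or any(v < k for v in cnt.values()):
--         return -1
--     n = len(s)
--     # index of every character's occurrence positions
--     pos = {}
--     for i, c in enumerate(s):
--         pos.setdefault(c, []).append(i)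
--     # For a left-take l, the minimal right-take for char c is determined directly from its
--     # occurrence positions: if t = k - (count of c in s[:l]) > 0, the t last occurrences must
--     # be taken, i.e. r >= n - pos[c][cnt[c] - t].  Scanning l downward, each step changes the
--     # requirement of the single char s[l] (and only upward), so a running max m tracks the
--     # minimal right-take; minimize l + m.
--     pref = dict(cnt)
--     m = 0
--     best = n          # l = n needs no right-take
--     for l in range(n - 1, -1, -1):
--         c = s[l]
--         pref[c] -= 1
--         t = k - pref[c]
--         if t > 0:
--             m = max(m, n - pos[c][cnt[c] - t])
--         best = min(best, l + m)
--     return best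
-- ===== Notes on version B (the rewrite author's own statement) =====
-- stated objective: alternative
-- what changed: Replaces A's two-pointer sliding window by an occurrence-position index: each char's minimal right-take is read off directly from its occurrence positions (the t missing occurrences must come from the end), and a single backward scan over left-takes keeps the running max of these demands and minimizes left-take + right-take.
import Mathlib
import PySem

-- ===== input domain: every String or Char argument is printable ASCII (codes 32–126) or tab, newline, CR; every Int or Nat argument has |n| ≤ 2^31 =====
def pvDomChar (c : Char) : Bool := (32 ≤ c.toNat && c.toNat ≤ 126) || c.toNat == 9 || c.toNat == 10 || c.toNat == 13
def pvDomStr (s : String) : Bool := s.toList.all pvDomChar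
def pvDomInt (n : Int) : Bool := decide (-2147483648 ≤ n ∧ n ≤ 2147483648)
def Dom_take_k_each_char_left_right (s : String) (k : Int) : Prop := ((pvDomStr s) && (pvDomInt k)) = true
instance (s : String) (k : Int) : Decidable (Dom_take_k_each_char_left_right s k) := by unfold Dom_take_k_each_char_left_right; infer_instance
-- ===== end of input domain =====

-- B replaces A's two-pointer sliding window by an occurrence-position index and one backward scan
-- keeping the running max of per-char right-take demands; a different algorithm of similar cost.

-- ===== PORT A =====
-- A's inner `while` loop; `fuel` only bounds the iteration count for totality (the loop runs at
-- most len(s) times on any input A accepts, so the fuel of len(s)+1 supplied below never runs out).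
def pvShrinkA (cs : List Char) (counter : PySem.Dict Char Int) (k : Int) (cj : Char) :
    Nat → PySem.Dict Char Int → Nat → PySem.Dict Char Int × Nat
  | 0, dt, i => (dt, i)
  | fuel+1, dt, i =>
    if dt.getD cj 0 > counter.getD cj 0 - k then
      match PySem.List.pyGet? cs (i : Int) with
      | some ci => pvShrinkA cs counter k cj fuel (dt.modify ci 0 (fun x => x - 1)) (i + 1)
      | none => (dt, i)   -- IndexError in Python; provably unreachable (i ≤ j always holds here)
    else (dt, i)

-- one iteration of A's `for j in range(len(s))` loop; state = (dt_counter, i, max_len)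
def pvStepA (cs : List Char) (counter : PySem.Dict Char Int) (k : Int)
    (st : PySem.Dict Char Int × Nat × Int) (j : Int) : PySem.Dict Char Int × Nat × Int :=
  match PySem.List.pyGet? cs j with
  | none => st   -- unreachable: j ranges over range(len(s))
  | some cj =>
    let p := pvShrinkA cs counter k cj (cs.length + 1) (st.1.modify cj 0 (fun x => x + 1)) st.2.1
    (p.1, p.2, max st.2.2 (j - (p.2 : Int) + 1))

def take_k_each_char_left_right (s : String) (k : Int) : Int :=
  if k = 0 then 0
  else if (PySem.Dict.counter s.toList).size < 3
      ∨ ((PySem.Dict.counter s.toList).values.any (fun x => decide (x < k))) = true then -1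
  else
    (s.toList.length : Int) -
      ((PySem.List.pyRange 0 (s.toList.length : Int) 1).foldl
        (pvStepA s.toList (PySem.Dict.counter s.toList) k)
        (PySem.Dict.empty, 0, 0)).2.2

-- ===== PORT B =====
-- one iteration of B's `for l in range(n - 1, -1, -1)` loop; state = (pref, m, best)
def pvStepB (cs : List Char) (pos : PySem.Dict Char (List Int)) (cnt : PySem.Dict Char Int)
    (k : Int) (st : PySem.Dict Char Int × Int × Int) (l : Int) :
    PySem.Dict Char Int × Int × Int :=
  match PySem.List.pyGet? cs l with
  | none => st   -- unreachable: l ranges over range(n-1, -1, -1)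
  | some c =>
    let pref := st.1.modify c 0 (fun x => x - 1)
    let t := k - pref.getD c 0
    let m :=
      if t > 0 then
        -- pos[c][cnt[c] - t]; the lookups cannot fail (c occurs in s and the index is in range)
        match PySem.List.pyGet? (pos.getD c []) (cnt.getD c 0 - t) with
        | some p => max st.2.1 ((cs.length : Int) - p)
        | none => st.2.1   -- IndexError in Python; provably unreachable
      else st.2.1
    (pref, m, min st.2.2 (l + m))

def take_k_each_char_left_right_alt (s : String) (k : Int) : Int :=
  if k = 0 then 0
  else
    if (s.toList.foldl (fun d c => d.insert c (d.getD c 0 + 1)) (PySem.Dict.empty : PySem.Dict Char Int)).size < 3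
        ∨ ((s.toList.foldl (fun d c => d.insert c (d.getD c 0 + 1)) (PySem.Dict.empty : PySem.Dict Char Int)).values.any
            (fun v => decide (v < k))) = true then -1
    else
      ((PySem.List.pyRange ((s.toList.length : Int) - 1) (-1) (-1)).foldl
        (pvStepB s.toList
          ((PySem.List.enumerate s.toList).foldl
            (fun d p => d.modify p.2 [] (fun xs => xs ++ [p.1])) PySem.Dict.empty)
          (s.toList.foldl (fun d c => d.insert c (d.getD c 0 + 1)) (PySem.Dict.empty : PySem.Dict Char Int))
          k)
        (s.toList.foldl (fun d c => d.insert c (d.getD c 0 + 1)) (PySem.Dict.empty : PySem.Dict Char Int),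
          0, (s.toList.length : Int))).2.2

-- ===== PRECONDITION & SPEC =====
def Spec_take_k_each_char_left_right (s : String) (k : Int) (out : Int) : Prop := out = take_k_each_char_left_right_alt s k
instance (s : String) (k : Int) (out : Int) : Decidable (Spec_take_k_each_char_left_right s k out) := by unfold Spec_take_k_each_char_left_right; infer_instance

-- ===== CLAIM (what is proved, stated in full; the proofs are below) =====
def Claim_equal_take_k_each_char_left_right : Prop := ∀ (s : String) (k : Int), Dom_take_k_each_char_left_right s k → Spec_take_k_each_char_left_right s k (take_k_each_char_left_right s k)

-- ===== LEMMAS AND PROOFS =====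

-- cnt c = s.count(c); pvP cs e c = number of occurrences of c among the first e characters
def pvCnt (cs : List Char) (c : Char) : Int := (cs.count c : Int)
def pvP (cs : List Char) (e : Nat) (c : Char) : Int := ((cs.take e).count c : Int)

-- the window cs[i:e] can be KEPT: every char still has k copies outside it
def pvValid (cs : List Char) (k : Int) (i e : Nat) : Bool :=
  cs.all (fun c => decide (pvP cs e c - pvP cs i c ≤ pvCnt cs c - k))

-- least left index of a keepable window ending at e (A's i after processing j = e-1)
def pvIMin (cs : List Char) (k : Int) (e : Nat) : Nat :=
  Nat.find (p := fun i => pvValid cs k i e = true ∨ e ≤ i) ⟨e, Or.inr le_rfl⟩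

-- least right-take r making left-take l valid (B's m after processing l)
def pvRMin (cs : List Char) (k : Int) (l : Nat) : Nat :=
  Nat.find (p := fun r => pvValid cs k l (cs.length - r) = true ∨ cs.length ≤ r) ⟨cs.length, Or.inr le_rfl⟩

-- A's max_len after j loop iterations
def pvM (cs : List Char) (k : Int) : Nat → Int
  | 0 => 0
  | j+1 => max (pvM cs k j) ((j : Int) + 1 - (pvIMin cs k (j+1) : Int))

-- B's best after d loop iterations (iteration d+1 processes l = n-1-d)
def pvG (cs : List Char) (k : Int) : Nat → Int
  | 0 => (cs.length : Int)
  | d+1 => min (pvG cs k d)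
      (((cs.length - (d+1) : Nat) : Int) + (pvRMin cs k (cs.length - (d+1)) : Int))

-- occurrence positions of c in cs, in increasing order
def pvOccN (cs : List Char) (c : Char) : List Nat :=
  (cs.zipIdx.filter (fun p => p.1 == c)).map (·.2)

-- minimal right-take demanded by the single char c at left-take l (0 if the prefix already has k)
def pvRC (cs : List Char) (k : Int) (l : Nat) (c : Char) : Nat :=
  if pvP cs l c < k then
    cs.length - (pvOccN cs c).getD (cs.count c - (k - pvP cs l c).toNat) 0
  else 0

lemma pvP_len (cs : List Char) (c : Char) : pvP cs cs.length c = pvCnt cs c := by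
  simp [pvP, pvCnt]

lemma pvP_succ (cs : List Char) {e : Nat} (h : e < cs.length) (c : Char) :
    pvP cs (e+1) c = pvP cs e c + (if cs[e] = c then 1 else 0) := by
  have h1 : cs.take (e+1) = cs.take e ++ [cs[e]] := by
    rw [List.take_add_one, List.getElem?_eq_getElem h]
    rfl
  simp only [pvP]
  rw [h1, List.count_append]
  by_cases hc : cs[e] = c
  · rw [if_pos hc]
    subst hc
    have h2 : List.count (cs[e]) [cs[e]] = 1 := by simp
    rw [h2]
    push_cast
    ring
  · rw [if_neg hc]
    have h2 : List.count c [cs[e]] = 0 := by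
      rw [List.count_eq_zero]
      simp only [List.mem_singleton]
      exact fun hcc => hc hcc.symm
    rw [h2]
    push_cast
    ring

lemma pvP_mono (cs : List Char) {i e : Nat} (h : i ≤ e) (c : Char) :
    pvP cs i c ≤ pvP cs e c := by
  have h1 : cs.take i = (cs.take e).take i := by
    rw [List.take_take, min_eq_left h]
  have h2 : (cs.take i).count c ≤ (cs.take e).count c := by
    rw [h1]; exact ((List.take_sublist i (cs.take e)).count_le c)
  simpa [pvP] using Int.ofNat_le.2 h2

lemma pvValid_iff (cs : List Char) (k : Int) (i e : Nat) :
    pvValid cs k i e = true ↔ ∀ c ∈ cs, pvP cs e c - pvP cs i c ≤ pvCnt cs c - k := by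
  simp [pvValid]

lemma pvValid_mono_i (cs : List Char) (k : Int) {i i' e : Nat}
    (h : pvValid cs k i e = true) (hii : i ≤ i') : pvValid cs k i' e = true := by
  rw [pvValid_iff] at *
  intro c hc
  have := h c hc
  have := pvP_mono cs hii c
  omega

lemma pvValid_mono_e (cs : List Char) (k : Int) {i e e' : Nat}
    (h : pvValid cs k i e = true) (hee : e' ≤ e) : pvValid cs k i e' = true := by
  rw [pvValid_iff] at *
  intro c hc
  have := h c hc
  have := pvP_mono cs hee c
  omega

lemma pvValid_of_le (cs : List Char) (k : Int)
    (Hk : ∀ c ∈ cs, k ≤ pvCnt cs c) {i e : Nat} (h : e ≤ i) : pvValid cs k i e = true := by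
  rw [pvValid_iff]
  intro c hc
  have := pvP_mono cs h c
  have := Hk c hc
  omega

lemma pvIMin_le (cs : List Char) (k : Int) (e : Nat) : pvIMin cs k e ≤ e :=
  Nat.find_le (Or.inr le_rfl)

lemma pvValid_iMin (cs : List Char) (k : Int) (Hk : ∀ c ∈ cs, k ≤ pvCnt cs c) (e : Nat) :
    pvValid cs k (pvIMin cs k e) e = true := by
  rcases Nat.find_spec (p := fun i => pvValid cs k i e = true ∨ e ≤ i) ⟨e, Or.inr le_rfl⟩ with h | h
  · exact h
  · exact pvValid_of_le cs k Hk h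

lemma pvIMin_not (cs : List Char) (k : Int) {i e : Nat} (h : i < pvIMin cs k e) :
    ¬ pvValid cs k i e = true ∧ i < e := by
  have := Nat.find_min (p := fun i => pvValid cs k i e = true ∨ e ≤ i) ⟨e, Or.inr le_rfl⟩ h
  rw [not_or] at this
  exact ⟨this.1, by omega⟩

lemma pvIMin_le_of_valid (cs : List Char) (k : Int) {i e : Nat}
    (h : pvValid cs k i e = true) : pvIMin cs k e ≤ i :=
  Nat.find_le (Or.inl h)

lemma pvIMin_mono (cs : List Char) (k : Int) (Hk : ∀ c ∈ cs, k ≤ pvCnt cs c) (e : Nat) :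
    pvIMin cs k e ≤ pvIMin cs k (e+1) := by
  apply pvIMin_le_of_valid
  exact pvValid_mono_e cs k (pvValid_iMin cs k Hk (e+1)) (Nat.le_succ e)

lemma pvRMin_le_len (cs : List Char) (k : Int) (l : Nat) : pvRMin cs k l ≤ cs.length :=
  Nat.find_le (Or.inr le_rfl)

lemma pvValid_rMin (cs : List Char) (k : Int) (Hk : ∀ c ∈ cs, k ≤ pvCnt cs c) (l : Nat) :
    pvValid cs k l (cs.length - pvRMin cs k l) = true := by
  rcases Nat.find_spec (p := fun r => pvValid cs k l (cs.length - r) = true ∨ cs.length ≤ r)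
      ⟨cs.length, Or.inr le_rfl⟩ with h | h
  · exact h
  · have h' : cs.length ≤ pvRMin cs k l := h
    have h'' := pvRMin_le_len cs k l
    have h0 : cs.length - pvRMin cs k l = 0 := by omega
    rw [h0]
    exact pvValid_of_le cs k Hk (Nat.zero_le l)

lemma pvRMin_le_of_valid (cs : List Char) (k : Int) {l r : Nat}
    (h : pvValid cs k l (cs.length - r) = true) : pvRMin cs k l ≤ r :=
  Nat.find_le (Or.inl h)

lemma pvRMin_mono (cs : List Char) (k : Int) (Hk : ∀ c ∈ cs, k ≤ pvCnt cs c) (l : Nat) :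
    pvRMin cs k (l+1) ≤ pvRMin cs k l := by
  apply pvRMin_le_of_valid
  exact pvValid_mono_i cs k (pvValid_rMin cs k Hk l) (Nat.le_succ l)

lemma pvRMin_len_zero (cs : List Char) (k : Int) (Hk : ∀ c ∈ cs, k ≤ pvCnt cs c) :
    pvRMin cs k cs.length = 0 := by
  have : pvRMin cs k cs.length ≤ 0 := by
    apply pvRMin_le_of_valid
    exact pvValid_of_le cs k Hk (by omega)
  omega

lemma pvIMin_zero (cs : List Char) (k : Int) : pvIMin cs k 0 = 0 := by
  have := pvIMin_le cs k 0; omega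

-- adding cs[e] on the right changes only the constraint of the char cs[e]
lemma pvValid_succ_iff (cs : List Char) (k : Int) {e : Nat} (he : e < cs.length) (i : Nat) :
    pvValid cs k i (e+1) = true ↔
      (pvValid cs k i e = true ∧
        pvP cs (e+1) (cs[e]) - pvP cs i (cs[e]) ≤ pvCnt cs (cs[e]) - k) := by
  constructor
  · intro h
    exact ⟨pvValid_mono_e cs k h (Nat.le_succ e),
      (pvValid_iff cs k i (e+1)).1 h _ (List.getElem_mem he)⟩
  · rintro ⟨h1, h2⟩
    rw [pvValid_iff]
    intro c hc
    by_cases hcc : cs[e] = c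
    · rw [← hcc]; exact h2
    · rw [pvP_succ cs he c, if_neg hcc]
      have := (pvValid_iff cs k i e).1 h1 c hc
      omega

-- ---- A's inner while loop computes pvIMin (j+1) ----
lemma pvShrinkA_spec (cs : List Char) (k : Int) (Hk : ∀ c ∈ cs, k ≤ pvCnt cs c)
    {j : Nat} (hj : j < cs.length) :
    ∀ (fuel i : Nat) (dt : PySem.Dict Char Int),
      pvIMin cs k j ≤ i → i ≤ pvIMin cs k (j+1) →
      (∀ c, dt.getD c 0 = pvP cs (j+1) c - pvP cs i c) →
      pvIMin cs k (j+1) - i < fuel →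
      ∃ dt', pvShrinkA cs (PySem.Dict.counter cs) k (cs[j]) fuel dt i
               = (dt', pvIMin cs k (j+1)) ∧
             ∀ c, dt'.getD c 0 = pvP cs (j+1) c - pvP cs (pvIMin cs k (j+1)) c := by
  intro fuel
  induction fuel with
  | zero => intro i dt _ _ _ h4; omega
  | succ fuel ih =>
    intro i dt h1 h2 h3 h4
    rcases Nat.lt_or_ge i (pvIMin cs k (j+1)) with hlt | hge
    · -- condition is true: shrink one step
      obtain ⟨hnv, hie⟩ := pvIMin_not cs k hlt
      have hvj : pvValid cs k i j = true :=
        pvValid_mono_i cs k (pvValid_iMin cs k Hk j) h1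
      have hcond : pvCnt cs (cs[j]) - k < pvP cs (j+1) (cs[j]) - pvP cs i (cs[j]) := by
        by_contra hcl
        exact hnv ((pvValid_succ_iff cs k hj i).2 ⟨hvj, by omega⟩)
      have hilen : i < cs.length := by omega
      have hget : PySem.List.pyGet? cs (i : Int) = some cs[i] := by
        rw [PySem.List.pyGet?_natCast, List.getElem?_eq_getElem hilen]
      have hcond' : dt.getD (cs[j]) 0 > (PySem.Dict.counter cs).getD (cs[j]) 0 - k := by
        rw [h3, PySem.Dict.getD_counter]
        exact hcond
      rw [pvShrinkA, if_pos hcond', hget]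
      apply ih (i+1) _ (by omega) (by omega) _ (by omega)
      intro c
      by_cases hcc : cs[i] = c
      · subst hcc
        rw [PySem.Dict.getD_modify_self, h3, pvP_succ cs hilen _, if_pos rfl]
        ring
      · rw [PySem.Dict.getD_modify_of_ne _ _ _ (fun h => hcc h.symm), h3,
          pvP_succ cs hilen c, if_neg hcc]
        ring
    · -- i = pvIMin (j+1): condition is false, stop
      have hieq : i = pvIMin cs k (j+1) := by omega
      subst hieq
      have hval := pvValid_iMin cs k Hk (j+1)
      have hcond : ¬ dt.getD (cs[j]) 0 > (PySem.Dict.counter cs).getD (cs[j]) 0 - k := by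
        rw [h3, PySem.Dict.getD_counter]
        have hc := (pvValid_iff cs k _ (j+1)).1 hval _ (List.getElem_mem hj)
        simp only [pvCnt] at hc
        omega
      rw [pvShrinkA, if_neg hcond]
      exact ⟨dt, rfl, h3⟩

-- ---- A's for loop: state after j iterations is (·, pvIMin j, pvM j) ----
lemma pvLoopA_spec (cs : List Char) (k : Int) (Hk : ∀ c ∈ cs, k ≤ pvCnt cs c) :
    ∀ j, j ≤ cs.length →
    ∃ dt, (List.map (Nat.cast : Nat → Int) (List.range j)).foldl
            (pvStepA cs (PySem.Dict.counter cs) k) (PySem.Dict.empty, 0, 0)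
          = (dt, pvIMin cs k j, pvM cs k j)
      ∧ ∀ c, dt.getD c 0 = pvP cs j c - pvP cs (pvIMin cs k j) c := by
  intro j
  induction j with
  | zero =>
    intro _
    refine ⟨PySem.Dict.empty, ?_, ?_⟩
    · have h0 : pvIMin cs k 0 = 0 := by
        have := pvIMin_le cs k 0; omega
      simp [h0, pvM]
    · intro c
      rw [pvIMin_zero]
      have h2 : (PySem.Dict.empty : PySem.Dict Char Int).getD c 0 = 0 := rfl
      rw [h2]
      simp [pvP]
  | succ j ihj =>
    intro hj1
    have hj : j < cs.length := by omega
    obtain ⟨dt, heq, hdt⟩ := ihj (by omega)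
    have hsplit : List.map (Nat.cast : Nat → Int) (List.range (j+1))
        = List.map (Nat.cast : Nat → Int) (List.range j) ++ [(j : Int)] := by
      rw [List.range_succ]
      simp
    rw [hsplit, List.foldl_append, heq]
    simp only [List.foldl_cons, List.foldl_nil]
    have hget : PySem.List.pyGet? cs ((j : Nat) : Int) = some cs[j] := by
      rw [PySem.List.pyGet?_natCast, List.getElem?_eq_getElem hj]
    have hdt1 : ∀ c, ((dt.modify (cs[j]) 0 (fun x => x + 1)).getD c 0)
        = pvP cs (j+1) c - pvP cs (pvIMin cs k j) c := by
      intro c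
      by_cases hcc : cs[j] = c
      · subst hcc
        rw [PySem.Dict.getD_modify_self, hdt, pvP_succ cs hj _, if_pos rfl]
        ring
      · rw [PySem.Dict.getD_modify_of_ne _ _ _ (fun h => hcc h.symm), hdt,
          pvP_succ cs hj c, if_neg hcc]
        ring
    obtain ⟨dt', hs, hdt'⟩ := pvShrinkA_spec cs k Hk hj (cs.length + 1) (pvIMin cs k j)
      (dt.modify (cs[j]) 0 (fun x => x + 1)) le_rfl (pvIMin_mono cs k Hk j) hdt1
      (by have := pvIMin_le cs k (j+1); omega)
    refine ⟨dt', ?_, hdt'⟩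
    simp only [pvStepA, hget, hs]
    have harith : (j : Int) - (pvIMin cs k (j+1) : Int) + 1
        = (j : Int) + 1 - (pvIMin cs k (j+1) : Int) := by ring
    simp [pvM, harith]

-- ---- B's occurrence table ----
lemma pvOccN_append (xs : List Char) (a c : Char) :
    pvOccN (xs ++ [a]) c = pvOccN xs c ++ (if a = c then [xs.length] else []) := by
  unfold pvOccN
  rw [List.zipIdx_append]
  simp only [List.zipIdx, List.filter_append, List.map_append]
  congr 1
  by_cases h : a = c
  · simp [h]
  · simp [h]

lemma pvOccN_length (cs : List Char) (c : Char) : (pvOccN cs c).length = cs.count c := by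
  induction cs using List.reverseRecOn with
  | nil => rfl
  | append_singleton xs a ih =>
    rw [pvOccN_append, List.length_append, ih, List.count_append]
    by_cases h : a = c
    · simp [h]
    · have h2 : c ≠ a := fun hc => h hc.symm
      simp [h]

lemma pvOccN_spec (cs : List Char) (c : Char) :
    ∀ j o, (pvOccN cs c)[j]? = some o →
      o < cs.length ∧ (cs.take o).count c = j ∧ (cs.take (o+1)).count c = j + 1 := by
  induction cs using List.reverseRecOn with
  | nil => intro j o h; simp [pvOccN] at h
  | append_singleton xs a ih =>
    intro j o h
    rw [pvOccN_append] at h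
    rcases Nat.lt_or_ge j (pvOccN xs c).length with hj | hj
    · rw [List.getElem?_append_left hj] at h
      obtain ⟨h1, h2, h3⟩ := ih j o h
      refine ⟨by simp; omega, ?_, ?_⟩
      · rw [List.take_append_of_le_length (by omega)]; exact h2
      · rw [List.take_append_of_le_length (by omega)]; exact h3
    · rw [List.getElem?_append_right hj] at h
      by_cases ha : a = c
      · rw [if_pos ha] at h
        have hj0 : j - (pvOccN xs c).length = 0 := by
          by_contra hne
          rw [List.getElem?_eq_none_iff.2 (by simp; omega)] at h
          simp at h
        rw [hj0] at h
        simp only [List.getElem?_cons_zero] at h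
        have ho : o = xs.length := by
          simpa using h.symm
        have hjeq : j = (pvOccN xs c).length := by omega
        subst ho
        refine ⟨by simp, ?_, ?_⟩
        · rw [List.take_append_of_le_length le_rfl, List.take_of_length_le le_rfl,
            hjeq, pvOccN_length]
        · rw [List.take_of_length_le (by simp), List.count_append, hjeq, pvOccN_length,
            ha]
          simp
      · rw [if_neg ha] at h
        rw [List.getElem?_eq_none_iff.2 (by simp)] at h
        simp at h

-- the port's pos dict holds exactly the occurrence positions (as Python ints)
lemma pvPos_getD (cs : List Char) (c : Char) :
    ((PySem.List.enumerate cs).foldl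
        (fun d p => d.modify p.2 [] (fun xs => xs ++ [p.1])) PySem.Dict.empty).getD c []
      = (pvOccN cs c).map (Nat.cast : Nat → Int) := by
  have h1 : (PySem.List.enumerate cs).foldl
        (fun d p => d.modify p.2 [] (fun xs => xs ++ [p.1]))
        (PySem.Dict.empty : PySem.Dict Char (List Int))
      = (((PySem.List.enumerate cs).map (fun p => (p.2, p.1))).foldl
          (fun d p => d.modify p.1 [] (fun xs => xs ++ [p.2])) PySem.Dict.empty) := by
    rw [List.foldl_map]
  rw [h1, PySem.Dict.getD_foldl_modify_append, PySem.List.enumerate_eq_zipIdx_map]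
  simp only [pvOccN, List.filter_map, List.map_map, Function.comp_def]
  simp

-- ---- the per-char demand pvRC decides the char's constraint ----
lemma pvRC_spec (cs : List Char) (k : Int) {c : Char} (hk : k ≤ pvCnt cs c) (l r : Nat) :
    (pvP cs (cs.length - r) c - pvP cs l c ≤ pvCnt cs c - k ↔ pvRC cs k l c ≤ r) := by
  by_cases h : pvP cs l c < k
  · -- the prefix is short of k: the t last occurrences must come from the right
    have ht1 : 1 ≤ (k - pvP cs l c).toNat := by omega
    have htc : ((k - pvP cs l c).toNat : Int) = k - pvP cs l c := by
      have : (0:Int) ≤ k - pvP cs l c := by omega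
      omega
    set tn := (k - pvP cs l c).toNat with htn
    have htcnt : tn ≤ cs.count c := by
      have hp : (0:Int) ≤ pvP cs l c := by
        simp only [pvP]; positivity
      simp only [pvCnt] at hk
      omega
    have hidx : cs.count c - tn < (pvOccN cs c).length := by
      rw [pvOccN_length]; omega
    obtain ⟨o, ho⟩ : ∃ o, (pvOccN cs c)[cs.count c - tn]? = some o :=
      ⟨_, List.getElem?_eq_getElem hidx⟩
    obtain ⟨holen, hco, hco1⟩ := pvOccN_spec cs c _ o ho
    have hgetD : (pvOccN cs c).getD (cs.count c - tn) 0 = o := by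
      rw [List.getD_eq_getElem?_getD, ho]; rfl
    have hrc : pvRC cs k l c = cs.length - o := by
      rw [pvRC, if_pos h, hgetD]
    rw [hrc]
    have hPo : pvP cs o c = ((cs.count c - tn : Nat) : Int) := by
      simp only [pvP, hco]
    have hPo1 : pvP cs (o+1) c = ((cs.count c - tn : Nat) : Int) + 1 := by
      simp only [pvP, hco1]; push_cast; ring
    constructor
    · intro hcond
      by_contra hlt
      have h1 : o + 1 ≤ cs.length - r := by omega
      have h2 := pvP_mono cs h1 c
      simp only [pvCnt] at hcond hk
      rw [hPo1] at h2
      omega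
    · intro hle
      have h1 : cs.length - r ≤ o := by omega
      have h2 := pvP_mono cs h1 c
      rw [hPo] at h2
      simp only [pvCnt] at hk ⊢
      omega
  · -- the prefix already holds k of c: no demand from the right
    rw [pvRC, if_neg h]
    have h1 := pvP_mono cs (Nat.sub_le cs.length r) c
    rw [pvP_len] at h1
    constructor
    · intro _; exact Nat.zero_le r
    · intro _; omega

-- ---- peeling one character off the left raises only that character's demand ----
lemma pvRMin_succ (cs : List Char) (k : Int) (Hk : ∀ c ∈ cs, k ≤ pvCnt cs c)
    {l : Nat} (hl : l < cs.length) :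
    pvRMin cs k l = max (pvRMin cs k (l+1)) (pvRC cs k l (cs[l])) := by
  have hkc : k ≤ pvCnt cs (cs[l]) := Hk _ (List.getElem_mem hl)
  apply le_antisymm
  · -- pvRMin l ≤ max: the max-take is valid for every char
    apply pvRMin_le_of_valid
    rw [pvValid_iff]
    intro c hc
    by_cases hcc : cs[l] = c
    · subst hcc
      exact (pvRC_spec cs k hkc l _).2 (le_max_right _ _)
    · have hstale : pvP cs l c = pvP cs (l+1) c := by
        rw [pvP_succ cs hl c, if_neg hcc]; ring
      have hv1 := (pvValid_iff cs k (l+1) _).1 (pvValid_rMin cs k Hk (l+1)) c hc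
      have hmle : cs.length - max (pvRMin cs k (l+1)) (pvRC cs k l (cs[l]))
          ≤ cs.length - pvRMin cs k (l+1) := by omega
      have := pvP_mono cs hmle c
      omega
  · -- max ≤ pvRMin l: both components are forced
    apply max_le
    · exact pvRMin_mono cs k Hk l
    · exact (pvRC_spec cs k hkc l _).1
        ((pvValid_iff cs k l _).1 (pvValid_rMin cs k Hk l) _ (List.getElem_mem hl))

-- ---- B's for loop (downward): final best is pvG n ----
lemma pvLoopB_spec (cs : List Char) (k : Int) (Hk : ∀ c ∈ cs, k ≤ pvCnt cs c) :
    ∀ l, l ≤ cs.length → ∀ pref : PySem.Dict Char Int,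
      (∀ c, pref.getD c 0 = pvP cs l c) →
      ((PySem.List.pyRange ((l : Nat) - 1 : Int) (-1) (-1)).foldl
          (pvStepB cs
            ((PySem.List.enumerate cs).foldl
              (fun d p => d.modify p.2 [] (fun xs => xs ++ [p.1])) PySem.Dict.empty)
            (PySem.Dict.counter cs) k)
          (pref, (pvRMin cs k l : Int), pvG cs k (cs.length - l))).2.2
        = pvG cs k cs.length := by
  intro l
  induction l with
  | zero =>
    intro _ pref _
    have hnil : PySem.List.pyRange ((0 : Nat) - 1 : Int) (-1) (-1) = [] := by
      norm_num [PySem.List.pyRange_neg_one]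
    rw [hnil]
    simp
  | succ l ihl =>
    intro hl1 pref hpref
    have hl : l < cs.length := by omega
    have hkc : k ≤ pvCnt cs (cs[l]) := Hk _ (List.getElem_mem hl)
    have hcast : (((l+1 : Nat) : Int) - 1) = (l : Int) := by push_cast; ring
    have hcons : PySem.List.pyRange ((l : Int)) (-1) (-1)
        = (l : Int) :: PySem.List.pyRange ((l : Int) - 1) (-1) (-1) := by
      apply PySem.List.pyRange_neg_one_cons
      omega
    rw [hcast, hcons, List.foldl_cons]
    have hget : PySem.List.pyGet? cs ((l : Nat) : Int) = some cs[l] := by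
      rw [PySem.List.pyGet?_natCast, List.getElem?_eq_getElem hl]
    -- the decremented pref dict holds the counts of cs[:l]
    have hpref' : ∀ c, ((pref.modify (cs[l]) 0 (fun x => x - 1)).getD c 0) = pvP cs l c := by
      intro c
      by_cases hcc : cs[l] = c
      · subst hcc
        rw [PySem.Dict.getD_modify_self, hpref, pvP_succ cs hl _, if_pos rfl]
        ring
      · rw [PySem.Dict.getD_modify_of_ne _ _ _ (fun h => hcc h.symm), hpref,
          pvP_succ cs hl c, if_neg hcc]
        ring
    -- the computed m is pvRMin l
    have hm : (if k - pvP cs l (cs[l]) > 0 then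
          match PySem.List.pyGet?
              (((PySem.List.enumerate cs).foldl
                (fun d p => d.modify p.2 [] (fun xs => xs ++ [p.1])) PySem.Dict.empty).getD (cs[l]) [])
              ((PySem.Dict.counter cs).getD (cs[l]) 0 - (k - pvP cs l (cs[l]))) with
          | some p => max ((pvRMin cs k (l+1) : Nat) : Int) ((cs.length : Int) - p)
          | none => ((pvRMin cs k (l+1) : Nat) : Int)
        else ((pvRMin cs k (l+1) : Nat) : Int))
        = ((pvRMin cs k l : Nat) : Int) := by
      by_cases ht : k - pvP cs l (cs[l]) > 0
      · rw [if_pos ht, pvPos_getD, PySem.Dict.getD_counter]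
        have htc : ((k - pvP cs l (cs[l])).toNat : Int) = k - pvP cs l (cs[l]) := by omega
        set tn := (k - pvP cs l (cs[l])).toNat with htn
        have htcnt : tn ≤ cs.count (cs[l]) := by
          have hp : (0:Int) ≤ pvP cs l (cs[l]) := by
            simp only [pvP]; positivity
          simp only [pvCnt] at hkc
          omega
        have hidxc : ((cs.count (cs[l]) : Int)) - (k - pvP cs l (cs[l]))
            = ((cs.count (cs[l]) - tn : Nat) : Int) := by omega
        have hidx : cs.count (cs[l]) - tn < (pvOccN cs (cs[l])).length := by
          rw [pvOccN_length]; omega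
        have hgetp : PySem.List.pyGet? ((pvOccN cs (cs[l])).map (Nat.cast : Nat → Int))
              (((cs.count (cs[l]) - tn : Nat) : Int))
            = some (((pvOccN cs (cs[l]))[cs.count (cs[l]) - tn]'hidx : Nat) : Int) := by
          rw [PySem.List.pyGet?_natCast]
          simp [List.getElem?_map, List.getElem?_eq_getElem hidx]
        rw [hidxc, hgetp]
        obtain ⟨holen, _, _⟩ := pvOccN_spec cs (cs[l]) _ _ (List.getElem?_eq_getElem hidx)
        have hrc : pvRC cs k l (cs[l])
            = cs.length - (pvOccN cs (cs[l]))[cs.count (cs[l]) - tn]'hidx := by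
          rw [pvRC, if_pos (by omega)]
          congr 1
          rw [List.getD_eq_getElem?_getD, List.getElem?_eq_getElem hidx]
          rfl
        rw [pvRMin_succ cs k Hk hl, hrc]
        rw [Nat.cast_max, Nat.cast_sub (Nat.le_of_lt holen)]
      · rw [if_neg ht]
        rw [pvRMin_succ cs k Hk hl]
        have hrc0 : pvRC cs k l (cs[l]) = 0 := by
          rw [pvRC, if_neg (by omega)]
        rw [hrc0]
        simp
    -- one step of the loop
    have hstep : pvStepB cs
          ((PySem.List.enumerate cs).foldl
            (fun d p => d.modify p.2 [] (fun xs => xs ++ [p.1])) PySem.Dict.empty)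
          (PySem.Dict.counter cs) k
          (pref, (pvRMin cs k (l+1) : Int), pvG cs k (cs.length - (l+1))) ((l : Nat) : Int)
        = (pref.modify (cs[l]) 0 (fun x => x - 1), (pvRMin cs k l : Int),
            min (pvG cs k (cs.length - (l+1))) ((l : Int) + (pvRMin cs k l : Int))) := by
      simp only [pvStepB, hget, hpref' (cs[l])]
      rw [hm]
    rw [hstep]
    have hd : cs.length - l = (cs.length - (l+1)) + 1 := by omega
    have hG : pvG cs k (cs.length - l)
        = min (pvG cs k (cs.length - (l+1))) ((l : Int) + (pvRMin cs k l : Int)) := by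
      rw [hd]
      simp only [pvG]
      rw [show cs.length - (cs.length - (l+1) + 1) = l from by omega]
    rw [← hG]
    exact ihl (by omega) _ hpref'

-- ---- characterizations of pvM and pvG, and the final exchange ----
lemma pvM_nonneg (cs : List Char) (k : Int) (j : Nat) : 0 ≤ pvM cs k j := by
  induction j with
  | zero => simp [pvM]
  | succ j ih =>
    simp only [pvM]
    exact le_trans ih (le_max_left _ _)

lemma pvM_ub (cs : List Char) (k : Int) :
    ∀ (j e : Nat), e ≤ j → (e : Int) - (pvIMin cs k e : Int) ≤ pvM cs k j := by
  intro j
  induction j with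
  | zero =>
    intro e he
    have : e = 0 := by omega
    subst this
    simp [pvIMin_zero, pvM]
  | succ j ih =>
    intro e he
    simp only [pvM]
    rcases Nat.lt_or_ge e (j+1) with h | h
    · exact le_trans (ih e (by omega)) (le_max_left _ _)
    · have heqe : e = j + 1 := by omega
      subst heqe
      have hc : ((j+1 : Nat) : Int) - (pvIMin cs k (j+1) : Int)
          = (j : Int) + 1 - (pvIMin cs k (j+1) : Int) := by push_cast; ring
      rw [hc]
      exact le_max_right _ _

lemma pvM_att (cs : List Char) (k : Int) :
    ∀ j : Nat, ∃ e : Nat, e ≤ j ∧ pvM cs k j = (e : Int) - (pvIMin cs k e : Int) := by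
  intro j
  induction j with
  | zero => exact ⟨0, le_rfl, by simp [pvIMin_zero, pvM]⟩
  | succ j ih =>
    simp only [pvM]
    rcases max_cases (pvM cs k j) ((j : Int) + 1 - (pvIMin cs k (j+1) : Int)) with ⟨h, _⟩ | ⟨h, _⟩
    · obtain ⟨e, he, heq⟩ := ih
      exact ⟨e, by omega, by rw [h]; exact heq⟩
    · refine ⟨j+1, le_rfl, ?_⟩
      rw [h]
      push_cast; ring

lemma pvG_ub (cs : List Char) (k : Int) :
    ∀ (d l : Nat), cs.length - d ≤ l → l ≤ cs.length →
      pvG cs k d ≤ (l : Int) + (pvRMin cs k l : Int) := by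
  intro d
  induction d with
  | zero =>
    intro l h1 h2
    have hleq : l = cs.length := by omega
    subst hleq
    simp only [pvG]
    have h0 : (0 : Int) ≤ (pvRMin cs k cs.length : Int) := by exact_mod_cast Nat.zero_le _
    omega
  | succ d ih =>
    intro l h1 h2
    simp only [pvG]
    rcases Nat.lt_or_ge l (cs.length - d) with h | h
    · have hleq : l = cs.length - (d+1) := by omega
      subst hleq
      exact min_le_right _ _
    · exact le_trans (min_le_left _ _) (ih l h h2)

lemma pvG_att (cs : List Char) (k : Int) (Hk : ∀ c ∈ cs, k ≤ pvCnt cs c) :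
    ∀ d : Nat, ∃ l : Nat, cs.length - d ≤ l ∧ l ≤ cs.length ∧
      pvG cs k d = (l : Int) + (pvRMin cs k l : Int) := by
  intro d
  induction d with
  | zero =>
    refine ⟨cs.length, by omega, le_rfl, ?_⟩
    rw [pvRMin_len_zero cs k Hk]
    simp only [pvG]
    simp
  | succ d ih =>
    simp only [pvG]
    rcases min_cases (pvG cs k d)
        (((cs.length - (d+1) : Nat) : Int) + (pvRMin cs k (cs.length - (d+1)) : Int)) with
      ⟨h, _⟩ | ⟨h, _⟩
    · obtain ⟨l, hl1, hl2, heq⟩ := ih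
      exact ⟨l, by omega, hl2, by rw [h]; exact heq⟩
    · exact ⟨cs.length - (d+1), le_rfl, by omega, by rw [h]⟩

lemma pvFinal (cs : List Char) (k : Int) (Hk : ∀ c ∈ cs, k ≤ pvCnt cs c) :
    (cs.length : Int) - pvM cs k cs.length = pvG cs k cs.length := by
  apply le_antisymm
  · -- n - M n ≤ G n, via the l attaining G n
    obtain ⟨l, _, hl2, heq⟩ := pvG_att cs k Hk cs.length
    rw [heq]
    set r := pvRMin cs k l with hrdef
    have hrlen : r ≤ cs.length := pvRMin_le_len cs k l
    have hval : pvValid cs k l (cs.length - r) = true := pvValid_rMin cs k Hk l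
    rcases Nat.lt_or_ge (cs.length - r) l with h | h
    · -- degenerate: kept window empty or negative; n < l + r
      have := pvM_nonneg cs k cs.length
      omega
    · have hi : pvIMin cs k (cs.length - r) ≤ l := pvIMin_le_of_valid cs k hval
      have hub := pvM_ub cs k cs.length (cs.length - r) (by omega)
      omega
  · -- G n ≤ n - M n, via the e attaining M n
    obtain ⟨e, he, heq⟩ := pvM_att cs k cs.length
    rw [heq]
    set i := pvIMin cs k e with hidef
    have hie : i ≤ e := pvIMin_le cs k e
    have hval : pvValid cs k i e = true := pvValid_iMin cs k Hk e
    have hrle : pvRMin cs k i ≤ cs.length - e := by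
      apply pvRMin_le_of_valid
      rw [Nat.sub_sub_self he]
      exact hval
    have hub := pvG_ub cs k cs.length i (by omega) (by omega)
    omega

-- guard failure gives every char at least k occurrences
lemma pvHk_of_guard (cs : List Char) (k : Int)
    (h : ¬ ((PySem.Dict.counter cs).values.any (fun v => decide (v < k))) = true) :
    ∀ c ∈ cs, k ≤ pvCnt cs c := by
  intro c hc
  by_contra hlt
  apply h
  rw [List.any_eq_true]
  refine ⟨pvCnt cs c, ?_, by simp only [decide_eq_true_eq]; omega⟩
  rw [PySem.Dict.values_eq_map_keys _ (PySem.Dict.nodup_keys_counter cs) 0]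
  have hcmem : c ∈ (PySem.Dict.counter cs).keys := by
    rw [PySem.Dict.keys_counter]
    exact (PySem.Set.mem_ofList cs c).2 hc
  have hmem := List.mem_map_of_mem (f := fun x => (PySem.Dict.counter cs).getD x 0) hcmem
  simpa [PySem.Dict.getD_counter, pvCnt] using hmem

-- ===== VERDICT (by name: the statement is the Claim_ definition above) =====
theorem take_k_each_char_left_right_spec : Claim_equal_take_k_each_char_left_right := by
  intro s k _
  unfold Spec_take_k_each_char_left_right
  unfold take_k_each_char_left_right take_k_each_char_left_right_alt
  simp only [PySem.Dict.foldl_insert_getD_add_one_eq_counter]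
  by_cases hk : k = 0
  · rw [if_pos hk, if_pos hk]
  rw [if_neg hk, if_neg hk]
  by_cases hg : (PySem.Dict.counter s.toList).size < 3
      ∨ ((PySem.Dict.counter s.toList).values.any (fun x => decide (x < k))) = true
  · rw [if_pos hg, if_pos hg]
  rw [if_neg hg, if_neg hg]
  rw [not_or] at hg
  have Hk : ∀ c ∈ s.toList, k ≤ pvCnt s.toList c := pvHk_of_guard s.toList k hg.2
  obtain ⟨dt, hA, _⟩ := pvLoopA_spec s.toList k Hk s.toList.length le_rfl
  rw [PySem.List.pyRange_zero_natCast, hA]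
  have hpref0 : ∀ c, (PySem.Dict.counter s.toList).getD c 0 = pvP s.toList s.toList.length c := by
    intro c
    rw [PySem.Dict.getD_counter, pvP_len]
    rfl
  have hB := pvLoopB_spec s.toList k Hk s.toList.length le_rfl (PySem.Dict.counter s.toList) hpref0
  rw [pvRMin_len_zero s.toList k Hk, Nat.sub_self] at hB
  simp only [pvG, Nat.cast_zero] at hB
  rw [hB]
  exact pvFinal s.toList k Hk
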